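-- pv_equiv track=rewrite | github.com/RishiSandrana/QED | main.py | searchByText
-- ===== SOURCE A (Python) =====
-- base93charset = 'abcdefghijklmnopqrstuvwxyzABCDEFGHIJKLMNOPQRSTUVWXYZ.,0123456789!@#$%^&*()-_=+[]{};\'\"<>/?\\|`~'
--
-- base90charset = 'abcdefghijklmnopqrstuvwxyzABCDEFGHIJKLMNOPQRSTUVWXYZ.,0123456789!@#$%^&*()-_=+[]{};:\'\"/?~ '
--
-- def convertFromBase10(x, base):
--     if base == 93:
--         charset = base93charset
--     elif base == 90:
--         charset = base90charset
--
--     if x < 0: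
--         sign = -1
--     elif x == 0:
--         return charset[0]
--     else:
--         sign = 1
--
--     x *= sign
--     chars = []
--     while x:
--         chars.append(charset[x % base])
--         x //= base
--     if sign < 0:
--         chars.append('-')
--     chars.reverse()
--     return ''.join(chars)
--
-- def searchByText(text, library_coordinate):
--     if len(text) < 3200:
--         text = text.ljust(3200) # Pads text if it has less than 3200 characters.
--
--     sum_value = 0
--     for i, v in enumerate(text[::-1]):
--         char_value = base90charset.index(v)
--         sum_value += char_value * (len(base90charset) ** i) # Converts base 90 text input to base 10 number.
--
--     seed = library_coordinate * (len(base90charset)**3200) + sum_value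
--     result = convertFromBase10(seed, 93) # Converts base 10 number to base 93 hex address.
--     return result
-- ===== SOURCE B (Python) =====
-- base93charset = 'abcdefghijklmnopqrstuvwxyzABCDEFGHIJKLMNOPQRSTUVWXYZ.,0123456789!@#$%^&*()-_=+[]{};\'\"<>/?\\|`~'
--
-- base90charset = 'abcdefghijklmnopqrstuvwxyzABCDEFGHIJKLMNOPQRSTUVWXYZ.,0123456789!@#$%^&*()-_=+[]{};:\'\"/?~ '
--
-- _IDX90 = {c: i for i, c in enumerate(base90charset)}
-- _POW90_3200 = 90 ** 3200
--
-- def _toBase93(x):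
--     if x == 0:
--         return base93charset[0]
--     neg = x < 0
--     if neg:
--         x = -x
--     s = ''
--     while x:
--         s = base93charset[x % 93] + s  # build big-endian by prepending: no list, no reverse
--         x //= 93
--     return '-' + s if neg else s
--
-- def searchByText(text, library_coordinate):
--     if len(text) < 3200:
--         text = text.ljust(3200)
--     value = 0
--     for c in text:  # Horner's method: one dict lookup per char, no per-char pow
--         value = value * 90 + _IDX90[c]
--     return _toBase93(library_coordinate * _POW90_3200 + value)
-- ===== Notes on version B (the rewrite author's own statement) =====
-- stated objective: faster
-- what changed: B converts text to a number with a single Horner pass using a precomputed char-to-index dict and one precomputed 90**3200 constant, instead of A's per-character base90charset.index scan plus a freshly recomputed 90**i power for every position, and builds the base-93 string big-endian by prepending digits instead of appending then reversing.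
import Mathlib
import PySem

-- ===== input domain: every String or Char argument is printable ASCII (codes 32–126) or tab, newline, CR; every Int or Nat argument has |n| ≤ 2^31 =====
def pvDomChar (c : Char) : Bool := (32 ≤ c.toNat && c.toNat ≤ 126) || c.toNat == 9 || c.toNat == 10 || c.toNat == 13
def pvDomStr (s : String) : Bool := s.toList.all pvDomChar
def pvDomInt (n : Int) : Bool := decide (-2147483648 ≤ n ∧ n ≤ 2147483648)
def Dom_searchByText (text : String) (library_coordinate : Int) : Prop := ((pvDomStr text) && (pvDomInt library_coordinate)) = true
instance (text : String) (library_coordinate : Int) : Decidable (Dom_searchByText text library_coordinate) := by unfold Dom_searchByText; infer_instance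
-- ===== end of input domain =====

-- B replaces A's per-character `base90charset.index` + fresh `90**i` power by a dict lookup inside a
-- single Horner pass, and converts to base 93 by prepending digits instead of append-then-reverse.

-- ===== PORT A =====

def chars93 : List Char :=
  "abcdefghijklmnopqrstuvwxyzABCDEFGHIJKLMNOPQRSTUVWXYZ.,0123456789!@#$%^&*()-_=+[]{};'\"<>/?\\|`~".toList

def chars90 : List Char :=
  "abcdefghijklmnopqrstuvwxyzABCDEFGHIJKLMNOPQRSTUVWXYZ.,0123456789!@#$%^&*()-_=+[]{};:'\"/?~ ".toList

-- the `while x: chars.append(charset[x % base]); x //= base` loop of convertFromBase10, on the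
-- nonnegative int x (exact: x ≥ 0 at that point, so Python's % and // are Nat's % and /);
-- the `base ≤ 1` disjunct only makes the recursion total — A only ever calls this with base = 93
def aDigitsLE (charset : List Char) (base : Nat) (n : Nat) : List Char :=
  if n = 0 ∨ base ≤ 1 then []
  else charset.getD (n % base) ' ' :: aDigitsLE charset base (n / base)
  termination_by n
  decreasing_by exact Nat.div_lt_self (by omega) (by omega)

def convertFromBase10 (x : Int) (base : Int) : String :=
  -- A leaves `charset` unbound for bases other than 93/90; it is only ever called with base = 93
  let charset := if base = 93 then chars93 else chars90
  if x < 0 then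
    -- sign = -1; x *= sign; while-loop; chars.append('-'); chars.reverse(); ''.join
    String.ofList ((aDigitsLE charset base.toNat (x * (-1)).toNat ++ ['-']).reverse)
  else if x = 0 then String.ofList [charset.getD 0 ' ']
  else String.ofList ((aDigitsLE charset base.toNat x.toNat).reverse)

def searchByText (text : String) (library_coordinate : Int) : String :=
  let t := text.toList
  let t := if t.length < 3200 then t ++ List.replicate (3200 - t.length) ' ' else t  -- text.ljust(3200)
  -- for i, v in enumerate(text[::-1]): sum += base90charset.index(v) * len(base90charset)**i
  -- (.index raises ValueError when v is absent: Pre_ excludes that; enumerate indices are ≥ 0, so .toNat is exact)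
  let sum_value : Int := (PySem.List.enumerate t.reverse).foldl
    (fun s p => s + ((PySem.List.index? chars90 p.2).getD 0 : Nat) * ((chars90.length : Int)) ^ p.1.toNat) 0
  let seed : Int := library_coordinate * ((chars90.length : Int)) ^ (3200 : Nat) + sum_value
  convertFromBase10 seed 93

-- ===== PORT B =====

-- _IDX90 = {c: i for i, c in enumerate(base90charset)}
def bIdx90 : PySem.Dict Char Int :=
  (PySem.List.enumerate chars90).foldl (fun d p => d.insert p.2 p.1) PySem.Dict.empty

def bPow90_3200 : Int := (90 : Int) ^ (3200 : Nat)   -- _POW90_3200 = 90 ** 3200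

-- the `while x: s = base93charset[x % 93] + s; x //= 93` prepend loop, on the nonnegative int (exact)
def bDigitsBE (n : Nat) (acc : List Char) : List Char :=
  if n = 0 then acc
  else bDigitsBE (n / 93) (chars93.getD (n % 93) ' ' :: acc)
  termination_by n
  decreasing_by exact Nat.div_lt_self (by omega) (by omega)

def bToBase93 (x : Int) : String :=
  if x = 0 then String.ofList [chars93.getD 0 ' ']
  else if x < 0 then String.ofList ('-' :: bDigitsBE (-x).toNat [])
  else String.ofList (bDigitsBE x.toNat [])

def searchByText_alt (text : String) (library_coordinate : Int) : String :=
  let t := text.toList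
  let t := if t.length < 3200 then t ++ List.replicate (3200 - t.length) ' ' else t
  -- Horner: value = value * 90 + _IDX90[c]  (KeyError when c is absent: Pre_ excludes that)
  let value : Int := t.foldl (fun v c => v * 90 + (bIdx90.get? c).getD 0) 0
  bToBase93 (library_coordinate * bPow90_3200 + value)

-- ===== PRECONDITION & SPEC =====

-- Pre_ excludes texts containing a character outside base90charset: there A's `.index` raises
-- ValueError (so A returns no value; B's dict lookup raises KeyError there too).
def Pre_searchByText (text : String) (library_coordinate : Int) : Prop :=
  text.toList.all (fun c => chars90.contains c) = true
instance (text : String) (library_coordinate : Int) : Decidable (Pre_searchByText text library_coordinate) := by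
  unfold Pre_searchByText; infer_instance

def pvWitness_searchByText : String × Int := ("Hello, world?", 42)

def Spec_searchByText (text : String) (library_coordinate : Int) (out : String) : Prop := out = searchByText_alt text library_coordinate
instance (text : String) (library_coordinate : Int) (out : String) : Decidable (Spec_searchByText text library_coordinate out) := by unfold Spec_searchByText; infer_instance

-- ===== CLAIM (what is proved, stated in full; the proofs are below) =====
def Claim_equal_searchByText : Prop := ∀ (text : String) (library_coordinate : Int), Dom_searchByText text library_coordinate → Pre_searchByText text library_coordinate → Spec_searchByText text library_coordinate (searchByText text library_coordinate)

-- ===== LEMMAS AND PROOFS =====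

set_option maxRecDepth 10000 in
lemma chars90_nodup : chars90.Nodup := by decide

lemma chars90_len : chars90.length = 90 := by decide

-- a fold of inserts never touches a key absent from the inserted pairs
lemma fold_insert_get_of_not_mem (ps : List (Int × Char)) (c : Char)
    (hc : c ∉ ps.map (·.2)) (d : PySem.Dict Char Int) :
    (ps.foldl (fun d p => d.insert p.2 p.1) d).get? c = d.get? c := by
  induction ps generalizing d with
  | nil => rfl
  | cons p ps ih =>
    simp only [List.map_cons, List.mem_cons, not_or] at hc
    rw [List.foldl_cons, ih hc.2, PySem.Dict.get?_insert_of_ne d p.1 hc.1]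

-- B's enumerate-built dict answers exactly A's list index
lemma dict_enum_get (l : List Char) (c : Char) (hnd : l.Nodup) (hc : c ∈ l) :
    ∀ (i : Int) (d : PySem.Dict Char Int),
    ((PySem.List.enumerate l i).foldl (fun d p => d.insert p.2 p.1) d).get? c
      = some (i + ((PySem.List.index? l c).getD 0 : Nat)) := by
  induction l with
  | nil => cases hc
  | cons a l ih =>
    intro i d
    rw [PySem.List.enumerate_cons, List.foldl_cons]
    by_cases h : c = a
    · subst h
      have hnotin := (List.nodup_cons.1 hnd).1
      rw [fold_insert_get_of_not_mem _ _ (by simpa [PySem.List.map_snd_enumerate] using hnotin),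
        PySem.Dict.get?_insert_self, PySem.List.index?_cons_self]
      simp
    · have hcl : c ∈ l := (List.mem_cons.1 hc).resolve_left h
      obtain ⟨k, hk⟩ := Option.isSome_iff_exists.1 ((PySem.List.index?_isSome_iff _ _).2 hcl)
      rw [ih (List.nodup_cons.1 hnd).2 hcl (i + 1),
        PySem.List.index?_cons_of_ne l (fun e => h (Eq.symm e)), hk]
      simp
      ring

lemma idx_agree (c : Char) (hc : c ∈ chars90) :
    (((PySem.List.index? chars90 c).getD 0 : Nat) : Int) = (bIdx90.get? c).getD 0 := by
  unfold bIdx90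
  rw [dict_enum_get chars90 c chars90_nodup hc 0 PySem.Dict.empty]
  simp

-- little-endian polynomial value of a digit list under a valuation g
def polyLE (g : Char → Int) : List Char → Int
  | [] => 0
  | c :: r => g c + 90 * polyLE g r

lemma polyLE_append (g : Char → Int) (r : List Char) (c : Char) :
    polyLE g (r ++ [c]) = polyLE g r + g c * 90 ^ r.length := by
  induction r with
  | nil => simp [polyLE]
  | cons d r ih => simp [polyLE, ih]; ring

lemma polyLE_congr (g h : Char → Int) (r : List Char) (hgh : ∀ c ∈ r, g c = h c) :
    polyLE g r = polyLE h r := by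
  induction r with
  | nil => rfl
  | cons d r ih => simp [polyLE, hgh d (by simp), ih (fun c hc => hgh c (by simp [hc]))]

-- A's enumerate-with-powers fold computes polyLE of the list it walks
lemma aSum_eq (g : Char → Int) (r : List Char) : ∀ (i : Int) (s : Int), 0 ≤ i →
    (PySem.List.enumerate r i).foldl (fun s p => s + g p.2 * 90 ^ p.1.toNat) s
      = s + polyLE g r * 90 ^ i.toNat := by
  induction r with
  | nil => intro i s _; simp [PySem.List.enumerate_nil, polyLE]
  | cons c r ih =>
    intro i s hi
    rw [PySem.List.enumerate_cons, List.foldl_cons, ih (i + 1) _ (by omega), polyLE]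
    have : (i + 1).toNat = i.toNat + 1 := by omega
    rw [this]; ring

-- B's Horner fold computes polyLE of the reversed list
lemma horner_eq (g : Char → Int) (l : List Char) : ∀ (v : Int),
    l.foldl (fun v c => v * 90 + g c) v = v * 90 ^ l.length + polyLE g l.reverse := by
  induction l with
  | nil => intro v; simp [polyLE]
  | cons c l ih =>
    intro v
    rw [List.foldl_cons, ih, List.reverse_cons, polyLE_append]
    simp [pow_succ]; ring

-- the two digit sums agree on any list of charset characters
lemma sums_eq (t : List Char) (hmem : ∀ c ∈ t, c ∈ chars90) :
    (PySem.List.enumerate t.reverse).foldl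
        (fun s p => s + ((PySem.List.index? chars90 p.2).getD 0 : Nat) * (90 : Int) ^ p.1.toNat) 0
      = t.foldl (fun v c => v * 90 + (bIdx90.get? c).getD 0) 0 := by
  have ha := aSum_eq (fun c => (((PySem.List.index? chars90 c).getD 0 : Nat) : Int)) t.reverse 0 0 (by norm_num)
  have hb := horner_eq (fun c => (bIdx90.get? c).getD 0) t 0
  simp only [pow_zero, mul_one, zero_mul, zero_add, Int.toNat_zero] at ha hb
  rw [ha, hb, polyLE_congr _ _ t.reverse
    (fun c hc => idx_agree c (hmem c (List.mem_reverse.1 hc)))]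

-- B's prepend loop is A's append loop reversed
lemma bDigitsBE_eq (n : Nat) : ∀ acc, bDigitsBE n acc = (aDigitsLE chars93 93 n).reverse ++ acc := by
  induction n using Nat.strong_induction_on with
  | _ n ih =>
    intro acc
    rw [bDigitsBE, aDigitsLE]
    by_cases h : n = 0
    · simp [h]
    · simp only [h, false_or, if_neg (by omega : ¬ (93:Nat) ≤ 1)]
      rw [ih (n / 93) (Nat.div_lt_self (by omega) (by omega))]
      simp

-- the two base-93 conversions agree on every integer
lemma conv_eq (x : Int) : convertFromBase10 x 93 = bToBase93 x := by
  unfold convertFromBase10 bToBase93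
  simp only [show ((93 : Int)).toNat = 93 from rfl, if_true]
  by_cases hneg : x < 0
  · rw [if_pos hneg, if_neg (by omega : ¬ x = 0), if_pos hneg,
      show x * (-1) = -x by ring, bDigitsBE_eq]
    simp
  · rw [if_neg hneg]
    by_cases h0 : x = 0
    · simp [h0]
    · rw [if_neg h0, if_neg h0, if_neg hneg, bDigitsBE_eq, List.append_nil]

-- ===== VERDICT (by name: the statement is the Claim_ definition above) =====
theorem searchByText_spec : Claim_equal_searchByText := by
  intro text lc _ hpre
  have hpre' : ∀ c ∈ text.toList, c ∈ chars90 := by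
    unfold Pre_searchByText at hpre
    simpa [List.all_eq_true] using hpre
  have hmem : ∀ c ∈ (if text.toList.length < 3200
      then text.toList ++ List.replicate (3200 - text.toList.length) ' ' else text.toList),
      c ∈ chars90 := by
    intro c hc
    split at hc
    · rcases List.mem_append.1 hc with h | h
      · exact hpre' c h
      · rw [List.eq_of_mem_replicate h]; decide
    · exact hpre' c hc
  unfold Spec_searchByText searchByText searchByText_alt
  simp only [chars90_len, Nat.cast_ofNat, bPow90_3200, conv_eq]
  rw [sums_eq _ hmem]
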